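-- pv_equiv track=rewrite | github.com/BrianSukowicz/textParser | words.py | editListOfWords
-- ===== SOURCE A (Python) =====
-- def editListOfWords(words):
--     for x in range(len(words)):
--         words[x] = words[x].capitalize()
--         words[x] = words[x].replace('.', "")
--         words[x] = words[x].replace(",", "")
--         words[x] = words[x].replace("?", "")
--         words[x] = words[x].replace("!", "")
--         words[x] = words[x].replace(";", "")
--         words[x] = words[x].replace(":", "")
--         words[x] = words[x].replace("(", "")
--         words[x] = words[x].replace(")", "")
--         words[x] = words[x].replace("{", "")
--         words[x] = words[x].replace("}", "")
--         words[x] = words[x].replace("/", "")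
--         words[x] = words[x].replace("[", "")
--         words[x] = words[x].replace("]", "")
--         words[x] = words[x].replace("'", "")
--         words[x] = words[x].replace("'s", "")
--         words[x] = words[x].replace('"', "")
--     return words
-- ===== SOURCE B (Python) =====
-- _PUNCT = frozenset(".,?!;:(){}/[]'\"")
--
-- def editListOfWords(words):
--     for x in range(len(words)):
--         words[x] = ''.join(c for c in words[x].capitalize() if c not in _PUNCT)
--     return words
-- ===== Notes on version B (the rewrite author's own statement) =====
-- stated objective: simpler
-- what changed: Replaces the chain of 16 full-string .replace() scans (including a dead "'s" replace that can never match after apostrophes are removed) by a single character-filtering pass against a punctuation set.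
import Mathlib
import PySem

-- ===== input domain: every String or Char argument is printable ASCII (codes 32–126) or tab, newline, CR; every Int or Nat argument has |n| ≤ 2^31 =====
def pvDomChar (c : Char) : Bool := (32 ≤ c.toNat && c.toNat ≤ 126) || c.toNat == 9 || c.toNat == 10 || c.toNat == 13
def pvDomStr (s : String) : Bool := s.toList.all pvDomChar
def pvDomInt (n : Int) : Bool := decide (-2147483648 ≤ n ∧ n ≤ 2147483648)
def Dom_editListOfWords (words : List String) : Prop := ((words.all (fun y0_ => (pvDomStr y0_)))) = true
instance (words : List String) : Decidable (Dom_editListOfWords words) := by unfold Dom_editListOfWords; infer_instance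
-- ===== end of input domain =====

-- B replaces A's chain of 16 sequential .replace scans by one character-filtering pass (objective: simpler).
-- Both Pythons mutate the input list in place and return it; the equivalence proved is about the return value.

-- str.capitalize(), exact on the ASCII domain: first char uppercased, rest lowercased (shared builtin helper)
def pyCapitalize (s : String) : List Char :=
  match s.toList with
  | [] => []
  | c :: t => PySem.Chars.upper [c] ++ PySem.Chars.lower t

-- ===== PORT A =====
def editListOfWords (words : List String) : List String :=
  -- 'for x in range(len(words)): words[x] = …' rewrites exactly index x each iteration, so the loop is this map
  words.map (fun w0 =>
    let w := String.ofList (pyCapitalize w0)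
    let w := PySem.Str.replace w "." ""
    let w := PySem.Str.replace w "," ""
    let w := PySem.Str.replace w "?" ""
    let w := PySem.Str.replace w "!" ""
    let w := PySem.Str.replace w ";" ""
    let w := PySem.Str.replace w ":" ""
    let w := PySem.Str.replace w "(" ""
    let w := PySem.Str.replace w ")" ""
    let w := PySem.Str.replace w "{" ""
    let w := PySem.Str.replace w "}" ""
    let w := PySem.Str.replace w "/" ""
    let w := PySem.Str.replace w "[" ""
    let w := PySem.Str.replace w "]" ""
    let w := PySem.Str.replace w "'" ""
    let w := PySem.Str.replace w "'s" ""
    let w := PySem.Str.replace w "\"" ""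
    w)

-- ===== PORT B =====
def pvPunct : List Char := ['.', ',', '?', '!', ';', ':', '(', ')', '{', '}', '/', '[', ']', '\'', '"']

def editListOfWords_alt (words : List String) : List String :=
  words.map (fun w => String.ofList ((pyCapitalize w).filter (fun c => !pvPunct.contains c)))

-- ===== PRECONDITION & SPEC =====
def Spec_editListOfWords (words : List String) (out : List String) : Prop := out = editListOfWords_alt words
instance (words : List String) (out : List String) : Decidable (Spec_editListOfWords words out) := by unfold Spec_editListOfWords; infer_instance

-- ===== CLAIM (what is proved, stated in full; the proofs are below) =====
def Claim_equal_editListOfWords : Prop := ∀ (words : List String), Dom_editListOfWords words → Spec_editListOfWords words (editListOfWords words)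

-- ===== LEMMAS AND PROOFS =====

-- replacing a single character by the empty string is filtering that character out
theorem replace_go_single (p : Char) : ∀ (fuel : Nat) (l acc : List Char), l.length ≤ fuel →
    PySem.Chars.replace.go [p] [] fuel l acc = acc.reverse ++ l.filter (fun c => c != p) := by
  intro fuel
  induction fuel with
  | zero =>
    intro l acc h
    have : l = [] := List.eq_nil_of_length_eq_zero (Nat.le_zero.mp h)
    subst this; simp [PySem.Chars.replace.go]
  | succ n ih =>
    intro l acc h
    cases l with
    | nil => simp [PySem.Chars.replace.go]
    | cons c t =>
      rw [PySem.Chars.replace.go.eq_def]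
      simp only [List.length_cons, Nat.add_le_add_iff_right] at h
      by_cases hc : p = c
      · subst hc
        simp only [List.isPrefixOf, beq_self_eq_true, Bool.true_and, List.isPrefixOf_nil_left,
          if_true, List.length_singleton, List.drop_succ_cons, List.drop_zero, List.reverse_nil,
          List.nil_append]
        rw [ih t acc h]
        simp
      · have hb : ([p].isPrefixOf (c :: t)) = false := by
          simp [List.isPrefixOf, hc]
        simp only [hb, if_false]
        rw [ih t (c :: acc) h]
        simp [List.filter_cons, bne, hc, Ne.symm hc]

theorem replace_single (p : Char) (s : String) :
    PySem.Str.replace s (String.ofList [p]) "" = String.ofList (s.toList.filter (fun c => c != p)) := by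
  simp only [PySem.Str.replace, String.toList_ofList]
  have : ("" : String).toList = [] := rfl
  rw [this, PySem.Chars.replace]
  simp only [List.isEmpty_cons, if_false, Bool.false_eq_true]
  exact congrArg String.ofList (by simpa using replace_go_single p s.toList.length s.toList [])

-- "'s" never matches once every apostrophe is gone
theorem replace_go_apos : ∀ (fuel : Nat) (l acc : List Char), l.length ≤ fuel →
    (∀ c ∈ l, c ≠ '\'') →
    PySem.Chars.replace.go ['\'', 's'] [] fuel l acc = acc.reverse ++ l := by
  intro fuel
  induction fuel with
  | zero =>
    intro l acc h _
    have : l = [] := List.eq_nil_of_length_eq_zero (Nat.le_zero.mp h)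
    subst this; simp [PySem.Chars.replace.go]
  | succ n ih =>
    intro l acc h hnone
    cases l with
    | nil => simp [PySem.Chars.replace.go]
    | cons c t =>
      rw [PySem.Chars.replace.go.eq_def]
      have hc : c ≠ '\'' := hnone c List.mem_cons_self
      have hb : (['\'', 's'].isPrefixOf (c :: t)) = false := by
        simp [List.isPrefixOf, Ne.symm hc]
      simp only [hb, if_false]
      simp only [List.length_cons, Nat.add_le_add_iff_right] at h
      rw [ih t (c :: acc) h (fun d hd => hnone d (List.mem_cons_of_mem _ hd))]
      simp

theorem replace_apos (s : String) (h : ∀ c ∈ s.toList, c ≠ '\'') :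
    PySem.Str.replace s "'s" "" = s := by
  have h1 : ("'s" : String).toList = ['\'', 's'] := rfl
  have h2 : ("" : String).toList = [] := rfl
  apply String.toList_inj.mp
  simp only [PySem.Str.replace, h1, h2, String.toList_ofList, PySem.Chars.replace]
  simp only [List.isEmpty_cons, if_false, Bool.false_eq_true]
  simpa using replace_go_apos s.toList.length s.toList [] le_rfl h

-- the per-word equality: A's 16-step replace chain = B's single filter
theorem word_eq (cs : List Char) :
    (let w := String.ofList cs
     let w := PySem.Str.replace w "." ""
     let w := PySem.Str.replace w "," ""
     let w := PySem.Str.replace w "?" ""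
     let w := PySem.Str.replace w "!" ""
     let w := PySem.Str.replace w ";" ""
     let w := PySem.Str.replace w ":" ""
     let w := PySem.Str.replace w "(" ""
     let w := PySem.Str.replace w ")" ""
     let w := PySem.Str.replace w "{" ""
     let w := PySem.Str.replace w "}" ""
     let w := PySem.Str.replace w "/" ""
     let w := PySem.Str.replace w "[" ""
     let w := PySem.Str.replace w "]" ""
     let w := PySem.Str.replace w "'" ""
     let w := PySem.Str.replace w "'s" ""
     let w := PySem.Str.replace w "\"" ""
     w) = String.ofList (cs.filter (fun c => !pvPunct.contains c)) := by
  have hapos : ∀ l : List Char,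
      PySem.Str.replace (String.ofList (l.filter (fun c => c != '\''))) "'s" "" =
        String.ofList (l.filter (fun c => c != '\'')) := by
    intro l
    apply replace_apos
    intro c hc
    simp only [String.toList_ofList, List.mem_filter, bne_iff_ne, ne_eq] at hc
    exact hc.2
  simp only [show ("." : String) = String.ofList ['.'] from rfl,
    show ("," : String) = String.ofList [','] from rfl,
    show ("?" : String) = String.ofList ['?'] from rfl,
    show ("!" : String) = String.ofList ['!'] from rfl,
    show (";" : String) = String.ofList [';'] from rfl,
    show (":" : String) = String.ofList [':'] from rfl,
    show ("(" : String) = String.ofList ['('] from rfl,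
    show (")" : String) = String.ofList [')'] from rfl,
    show ("{" : String) = String.ofList ['{'] from rfl,
    show ("}" : String) = String.ofList ['}'] from rfl,
    show ("/" : String) = String.ofList ['/'] from rfl,
    show ("[" : String) = String.ofList ['['] from rfl,
    show ("]" : String) = String.ofList [']'] from rfl,
    show ("'" : String) = String.ofList ['\''] from rfl,
    show ("\"" : String) = String.ofList ['"'] from rfl,
    replace_single, hapos, String.toList_ofList]
  apply congrArg
  simp only [List.filter_filter]
  apply List.filter_congr
  intro c _
  by_cases h : c ∈ pvPunct
  · fin_cases h <;> rfl
  · simp only [pvPunct, List.mem_cons, List.not_mem_nil, or_false, not_or] at h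
    obtain ⟨h1, h2, h3, h4, h5, h6, h7, h8, h9, h10, h11, h12, h13, h14, h15⟩ := h
    have hm : ¬ c ∈ pvPunct := by simp [pvPunct, h1, h2, h3, h4, h5, h6, h7, h8, h9, h10, h11, h12, h13, h14, h15]
    simp [beq_iff_eq, hm, h1, h2, h3, h4, h5, h6, h7, h8, h9, h10, h11, h12, h13, h14, h15]

-- ===== VERDICT (by name: the statement is the Claim_ definition above) =====
theorem editListOfWords_spec : Claim_equal_editListOfWords := by
  intro words _
  unfold Spec_editListOfWords editListOfWords editListOfWords_alt
  exact List.map_congr_left (fun w _ => word_eq (pyCapitalize w))
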